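-- pv_equiv track=rewrite | github.com/majoporse/uni | ib111/10/p4_digits.py | digi1
-- ===== SOURCE A (Python) =====
-- from typing import Set
--
-- def digi1(digit_sum: int, max_length: int,
--           current: int, result: Set[int]) -> Set[int]:
--
--     if current > 0 and digit_sum < dgt_sum(current):
--         return result
--
--     if digit_sum == dgt_sum(current):
--         result.add(current)
--
--     if max_length == 0:
--         return result
--
--     for i in range(10):
--         digi1(digit_sum, max_length - 1, current * 10 + i, result)
--
--     return result
--
-- def dgt_sum(num: int) -> int:
--     result = 0
--     while num > 0:
--         result += num % 10
--         num //= 10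
--     return result
-- ===== SOURCE B (Python) =====
-- def digi1(digit_sum, max_length, current, result):
--     stack = [(current, dgt_sum(current), max_length)]
--     while stack:
--         pfx, ssum, remaining = stack.pop()
--         if ssum == digit_sum:
--             result.add(pfx)
--         if remaining > 0:
--             for d in range(9, -1, -1):
--                 s = ssum + d
--                 if s <= digit_sum <= s + 9 * (remaining - 1):
--                     stack.append((pfx * 10 + d, s, remaining - 1))
--     return result
--
--
-- def dgt_sum(num):
--     result = 0
--     while num > 0:
--         result += num % 10
--         num //= 10
--     return result
-- ===== Notes on version B (the rewrite author's own statement) =====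
-- stated objective: alternative
-- what changed: B replaces A's exhaustive 10^max_length recursive scan (dgt_sum recomputed from scratch at every node) by an explicit-stack loop that carries the running digit sum and only pushes digit branches whose remaining positions (at 9 per digit) can still reach the target.
-- outside the precondition, e.g. on digi1(1, 1, -1, set()): A returns set(), B returns {-9}; on digi1(0, 1, -1, set()): A returns {-2, -9, -8, -7, -6, -5, -4, -3, -1, -10}, B returns {-1, -10}; on digi1(0, -1, 0, set()): A raises RecursionError, B returns {0}
import Mathlib
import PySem

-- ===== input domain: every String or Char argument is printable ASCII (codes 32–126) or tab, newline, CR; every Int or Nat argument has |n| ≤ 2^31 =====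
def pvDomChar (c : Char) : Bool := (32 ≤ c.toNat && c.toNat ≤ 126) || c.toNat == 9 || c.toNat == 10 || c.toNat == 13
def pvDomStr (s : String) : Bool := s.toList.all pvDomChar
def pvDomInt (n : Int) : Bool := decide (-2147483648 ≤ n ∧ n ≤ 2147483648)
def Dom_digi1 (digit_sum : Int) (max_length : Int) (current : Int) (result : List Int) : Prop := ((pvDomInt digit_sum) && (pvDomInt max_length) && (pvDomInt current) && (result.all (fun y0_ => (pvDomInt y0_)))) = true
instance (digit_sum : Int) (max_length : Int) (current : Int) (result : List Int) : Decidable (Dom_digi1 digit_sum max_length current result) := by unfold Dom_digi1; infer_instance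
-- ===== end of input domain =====

-- B replaces A's exhaustive 10^max_length recursive scan by an explicit-stack loop that carries
-- the running digit sum and only pushes digit branches that can still reach the target
-- (objective: alternative). Both A and B mutate the argument set `result` in place in Python,
-- adding the same elements; the equivalence proved here is about the returned value.

-- ===== PORT A =====
-- helper dgt_sum: result = 0; while num > 0: result += num % 10; num //= 10
-- (fuel = num.toNat only guards totality of the while loop; it never runs out, see dgtSumGo_key)
def dgtSumGo (fuel : Nat) (num acc : Int) : Int :=
  match fuel with
  | 0 => acc
  | f + 1 =>
    if 0 < num then dgtSumGo f (PySem.Int.floordiv num 10) (acc + PySem.Int.mod num 10) else acc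

def dgtSum (num : Int) : Int := dgtSumGo num.toNat num 0

-- the recursion of A; fuel = max_length.toNat only guards totality (under Pre_, fuel runs out
-- exactly when the `max_length == 0` return fires)
def digi1F (fuel : Nat) (digit_sum max_length current : Int) (result : List Int) : List Int :=
  if 0 < current ∧ digit_sum < dgtSum current then result
  else
    let result1 := if digit_sum = dgtSum current then PySem.Set.add result current else result
    if max_length = 0 then result1
    else
      match fuel with
      | 0 => result1
      | f + 1 =>
        (PySem.List.pyRange 0 10 1).foldl
          (fun r i => digi1F f digit_sum (max_length - 1) (current * 10 + i) r) result1

def digi1 (digit_sum : Int) (max_length : Int) (current : Int) (result : List Int) : List Int :=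
  digi1F max_length.toNat digit_sum max_length current result

-- ===== PORT B =====
-- termination measure of the stack loop: a popped frame of weight 11^remaining is replaced by at
-- most ten frames of weight 11^(remaining-1) each (cited in decreasing_by below)
theorem pushWeight {P : Int → Prop} [DecidablePred P] (mk : Int → Int × Int × Nat) (f : Nat)
    (hmk : ∀ d, (mk d).2.2 = f) (l : List Int) :
    ∀ (st : List (Int × Int × Nat)),
      ((l.foldl (fun st d => if P d then mk d :: st else st) st).map (fun fr => 11 ^ fr.2.2)).sum
        ≤ (st.map (fun fr => 11 ^ fr.2.2)).sum + l.length * 11 ^ f := by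
  induction l with
  | nil => intro st; simp
  | cons d t ih =>
    intro st
    simp only [List.foldl_cons, List.length_cons]
    refine le_trans (ih _) ?_
    have hstep : (((if P d then mk d :: st else st).map (fun fr => 11 ^ fr.2.2)).sum : Nat)
        ≤ (st.map (fun fr => 11 ^ fr.2.2)).sum + 11 ^ f := by
      by_cases h : P d
      · simp only [if_pos h, List.map_cons, List.sum_cons, hmk d]
        rw [Nat.add_comm]
      · simp only [if_neg h]
        exact Nat.le_add_right _ _
    refine le_trans (Nat.add_le_add_right hstep _) (le_of_eq ?_)
    ring

-- the while-stack loop of Source B; head of the list = top of the stack, digits pushed 9..0 so that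
-- they are popped 0..9
def digi1Loop (digit_sum : Int) (stack : List (Int × Int × Nat)) (result : List Int) : List Int :=
  match stack with
  | [] => result
  | (pfx, ssum, remaining) :: rest =>
    let result1 := if ssum = digit_sum then PySem.Set.add result pfx else result
    match remaining with
    | 0 => digi1Loop digit_sum rest result1
    | f + 1 =>
      digi1Loop digit_sum
        ((PySem.List.pyRange 9 (-1) (-1)).foldl
          (fun st d =>
            if ssum + d ≤ digit_sum ∧ digit_sum ≤ ssum + d + 9 * (f : Int) then
              (pfx * 10 + d, ssum + d, f) :: st
            else st) rest) result1
termination_by (stack.map (fun fr => 11 ^ fr.2.2)).sum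
decreasing_by
  · simp only [List.map_cons, List.sum_cons, pow_zero]
    omega
  · simp only [List.map_cons, List.sum_cons]
    have hlen : (PySem.List.pyRange 9 (-1) (-1)).length = 10 := by decide
    have hpw := pushWeight (P := fun d => ssum + d ≤ digit_sum ∧ digit_sum ≤ ssum + d + 9 * (f : Int))
      (mk := fun d => (pfx * 10 + d, ssum + d, f)) f (fun _ => rfl)
      (PySem.List.pyRange 9 (-1) (-1)) rest
    rw [hlen] at hpw
    refine lt_of_le_of_lt hpw ?_
    rw [pow_succ]
    have hp : (0:Nat) < 11 ^ f := pow_pos (by norm_num) f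
    generalize (11:Nat) ^ f = b at hp ⊢
    omega

def digi1_alt (digit_sum : Int) (max_length : Int) (current : Int) (result : List Int) : List Int :=
  digi1Loop digit_sum [(current, dgtSum current, max_length.toNat)] result

-- ===== PRECONDITION & SPEC =====
-- Pre_ excludes max_length < 0, on which A recurses without bound (RecursionError) unless its
-- top-level prune fires, and the negative-current corner where digit_sum is nonnegative and
-- reachable (0 ≤ digit_sum ≤ 9*max_length): there dgt_sum reads every value as digit-sum 0 and
-- what A adds is an artefact of the `while num > 0` loop; for negative current with digit_sum
-- negative or unreachable nothing is ever added and the inputs stay inside Pre_.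
def Pre_digi1 (digit_sum : Int) (max_length : Int) (current : Int) (result : List Int) : Prop :=
  0 ≤ max_length ∧ (0 ≤ current ∨ digit_sum < 0 ∨ 9 * max_length < digit_sum)
instance (digit_sum : Int) (max_length : Int) (current : Int) (result : List Int) : Decidable (Pre_digi1 digit_sum max_length current result) := by unfold Pre_digi1; infer_instance
def pvWitness_digi1 : Int × Int × Int × List Int := (5, 2, 0, [])

def Spec_digi1 (digit_sum : Int) (max_length : Int) (current : Int) (result : List Int) (out : List Int) : Prop := out = digi1_alt digit_sum max_length current result
instance (digit_sum : Int) (max_length : Int) (current : Int) (result : List Int) (out : List Int) : Decidable (Spec_digi1 digit_sum max_length current result out) := by unfold Spec_digi1; infer_instance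

-- ===== CLAIM (what is proved, stated in full; the proofs are below) =====
def Claim_equal_digi1 : Prop := ∀ (digit_sum : Int) (max_length : Int) (current : Int) (result : List Int), Dom_digi1 digit_sum max_length current result → Pre_digi1 digit_sum max_length current result → Spec_digi1 digit_sum max_length current result (digi1 digit_sum max_length current result)

-- ===== LEMMAS AND PROOFS =====

-- the recursive DFS both programs factor through: visit a prefix with its running digit sum,
-- then the feasible digit extensions in increasing order
def digi1Go (digit_sum pfx ssum : Int) (remaining : Nat) (result : List Int) : List Int :=
  let result1 := if ssum = digit_sum then PySem.Set.add result pfx else result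
  match remaining with
  | 0 => result1
  | f + 1 =>
    (PySem.List.pyRange 0 10 1).foldl
      (fun r d =>
        if ssum + d ≤ digit_sum ∧ digit_sum ≤ ssum + d + 9 * (f : Int) then
          digi1Go digit_sum (pfx * 10 + d) (ssum + d) f r
        else r) result1

-- the fuel num.toNat always suffices, and the accumulator adds up
theorem dgtSumGo_key (fuel : Nat) : ∀ (num acc : Int), num.toNat ≤ fuel →
    dgtSumGo fuel num acc = acc + dgtSum num := by
  induction fuel using Nat.strong_induction_on with
  | _ fuel ih =>
    intro num acc hle
    match fuel with
    | 0 =>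
      have h0 : num.toNat = 0 := by omega
      unfold dgtSum
      rw [h0]
      simp [dgtSumGo]
    | f + 1 =>
      by_cases h : 0 < num
      · have hdiv : PySem.Int.floordiv num 10 = num / 10 :=
          PySem.Int.floordiv_eq_ediv_of_pos (by omega)
        have hmod : PySem.Int.mod num 10 = num % 10 :=
          PySem.Int.mod_eq_emod_of_pos (by omega)
        obtain ⟨t, ht⟩ : ∃ t, num.toNat = t + 1 := ⟨num.toNat - 1, by omega⟩
        have hL : dgtSumGo (f + 1) num acc
            = dgtSumGo f (num / 10) (acc + num % 10) := by
          simp only [dgtSumGo, if_pos h, hdiv, hmod]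
        have hR : dgtSum num = dgtSumGo t (num / 10) (0 + num % 10) := by
          unfold dgtSum
          rw [ht]
          simp only [dgtSumGo, if_pos h, hdiv, hmod]
        rw [hL, hR, ih f (by omega) (num / 10) (acc + num % 10) (by omega),
            ih t (by omega) (num / 10) (0 + num % 10) (by omega)]
        omega
      · have h0 : num.toNat = 0 := by omega
        unfold dgtSum
        rw [h0]
        simp [dgtSumGo, h]

theorem dgtSum_zero : dgtSum 0 = 0 := rfl

-- digit sum of one appended digit
theorem dgtSum_step (a i : Int) (ha : 0 ≤ a) (hi : 0 ≤ i) (hi' : i < 10) :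
    dgtSum (a * 10 + i) = dgtSum a + i := by
  by_cases h : 0 < a * 10 + i
  · have hdiv : PySem.Int.floordiv (a * 10 + i) 10 = a := by
      rw [PySem.Int.floordiv_eq_ediv_of_pos (by omega)]; omega
    have hmod : PySem.Int.mod (a * 10 + i) 10 = i := by
      rw [PySem.Int.mod_eq_emod_of_pos (by omega)]; omega
    obtain ⟨t, ht⟩ : ∃ t, (a * 10 + i).toNat = t + 1 := ⟨(a * 10 + i).toNat - 1, by omega⟩
    have hunf : dgtSum (a * 10 + i) = dgtSumGo t a (0 + i) := by
      unfold dgtSum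
      rw [ht]
      simp only [dgtSumGo, if_pos h, hdiv, hmod]
    rw [hunf, dgtSumGo_key t a (0 + i) (by omega)]
    omega
  · have ha0 : a = 0 := by omega
    have hi0 : i = 0 := by omega
    subst ha0; subst hi0
    simp [dgtSum_zero]

-- a foldl whose step fixes the accumulator on every list element is the identity
theorem foldl_fix {α β : Type} (f : α → β → α) (l : List β) (r : α)
    (h : ∀ r' b, b ∈ l → f r' b = r') : l.foldl f r = r := by
  induction l generalizing r with
  | nil => rfl
  | cons b t ih =>
    simp only [List.foldl_cons]
    rw [h r b (by simp), ih r (fun r' b' hb' => h r' b' (by simp [hb']))]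

-- a subtree A explores but in which nothing can ever be added returns the set unchanged
theorem digi1F_dead (D : Int) : ∀ (f : Nat) (ml cur : Int) (res : List Int), 0 ≤ cur →
    (D < dgtSum cur ∨ dgtSum cur + 9 * (f : Int) < D) →
    digi1F f D ml cur res = res := by
  intro f
  induction f with
  | zero =>
    intro ml cur res hc hor
    rw [digi1F]
    by_cases hp : 0 < cur ∧ D < dgtSum cur
    · rw [if_pos hp]
    · have hne : ¬ D = dgtSum cur := by
        rcases hor with h | h
        · omega
        · simp only [Nat.cast_zero, mul_zero, add_zero] at h; omega
      rw [if_neg hp]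
      simp only [if_neg hne]
      split <;> rfl
  | succ f ih =>
    intro ml cur res hc hor
    rw [digi1F]
    by_cases hp : 0 < cur ∧ D < dgtSum cur
    · rw [if_pos hp]
    · have hne : ¬ D = dgtSum cur := by
        rcases hor with h | h
        · omega
        · have h9 : (0:Int) ≤ 9 * ((f:Int) + 1) := by positivity
          push_cast at h; omega
      rw [if_neg hp]
      simp only [if_neg hne]
      by_cases hml : ml = 0
      · rw [if_pos hml]
      · rw [if_neg hml]
        apply foldl_fix
        intro r' i hi
        rw [PySem.List.mem_pyRange_one] at hi
        have hchild : dgtSum (cur * 10 + i) = dgtSum cur + i :=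
          dgtSum_step cur i hc hi.1 hi.2
        apply ih (ml - 1) (cur * 10 + i) r' (by omega)
        rcases hor with h | h
        · have hcur0 : cur = 0 := by
            by_contra hne'
            exact hp ⟨by omega, h⟩
          subst hcur0
          rw [dgtSum_zero] at h
          left
          rw [hchild, dgtSum_zero]
          omega
        · right
          rw [hchild]
          push_cast at h
          omega

-- main invariant: A's recursion equals the pruned DFS carrying the running digit sum
theorem digi1F_eq_go (D : Int) : ∀ (f : Nat) (cur : Int) (res : List Int), 0 ≤ cur →
    digi1F f D (f : Int) cur res = digi1Go D cur (dgtSum cur) f res := by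
  intro f
  induction f with
  | zero =>
    intro cur res hc
    rw [digi1F, digi1Go]
    by_cases hp : 0 < cur ∧ D < dgtSum cur
    · have hne : ¬ dgtSum cur = D := by omega
      rw [if_pos hp]
      simp [hne]
    · rw [if_neg hp]
      by_cases hD : D = dgtSum cur
      · simp [hD]
      · have hne : ¬ dgtSum cur = D := fun h => hD h.symm
        simp [hD, hne]
  | succ f ih =>
    intro cur res hc
    rw [digi1F, digi1Go]
    have hml : ¬ ((f : Int) + 1 = 0) := by omega
    by_cases hp : 0 < cur ∧ D < dgtSum cur
    · have hne : ¬ dgtSum cur = D := by omega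
      rw [if_pos hp]
      simp only [if_neg hne]
      rw [foldl_fix]
      intro r' d hd
      rw [PySem.List.mem_pyRange_one] at hd
      have hno : ¬ (dgtSum cur + d ≤ D ∧ D ≤ dgtSum cur + d + 9 * (f : Int)) := by omega
      rw [if_neg hno]
    · rw [if_neg hp]
      have hadd : (if D = dgtSum cur then PySem.Set.add res cur else res)
          = (if dgtSum cur = D then PySem.Set.add res cur else res) := by
        by_cases hD : D = dgtSum cur
        · simp [hD]
        · have hne : ¬ dgtSum cur = D := fun h => hD h.symm
          rw [if_neg hD, if_neg hne]
      simp only [Nat.cast_succ, if_neg hml]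
      rw [hadd]
      apply PySem.List.foldl_congr_mem
      intro r i hi
      rw [PySem.List.mem_pyRange_one] at hi
      have hchild : dgtSum (cur * 10 + i) = dgtSum cur + i :=
        dgtSum_step cur i hc hi.1 hi.2
      have hml1 : (f : Int) + 1 - 1 = (f : Int) := by ring
      rw [hml1]
      by_cases hcond : dgtSum cur + i ≤ D ∧ D ≤ dgtSum cur + i + 9 * (f : Int)
      · rw [if_pos hcond, ih (cur * 10 + i) r (by omega), hchild]
      · rw [if_neg hcond]
        apply digi1F_dead D f (f : Int) (cur * 10 + i) r (by omega)
        rw [hchild]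
        omega

-- pushing filtered digits 9..0 on a stack lists them 0..9 on top
theorem foldl_push_rev {α β : Type} (P : β → Prop) [DecidablePred P] (mk : β → α) :
    ∀ (l : List β) (st : List α),
      l.foldl (fun st d => if P d then mk d :: st else st) st
        = ((l.reverse.filter (fun d => decide (P d))).map mk) ++ st := by
  intro l
  induction l with
  | nil => intro st; simp
  | cons d t ih =>
    intro st
    simp only [List.foldl_cons, List.reverse_cons, List.filter_append, List.map_append,
      List.append_assoc]
    rw [ih]
    by_cases h : P d <;> simp [h]

-- a guarded foldl is the foldl over the filtered, mapped elements
theorem foldl_if_filter_map {β γ δ : Type} (P : β → Prop) [DecidablePred P] (mk : β → γ)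
    (g : δ → γ → δ) :
    ∀ (l : List β) (r : δ),
      l.foldl (fun r d => if P d then g r (mk d) else r) r
        = ((l.filter (fun d => decide (P d))).map mk).foldl g r := by
  intro l
  induction l with
  | nil => intro r; rfl
  | cons d t ih =>
    intro r
    by_cases h : P d <;> simp [h, ih]

-- popping a zero-remaining frame just visits it
theorem loop_run_zero (D pfx ssum : Int) (rest : List (Int × Int × Nat)) (res : List Int) :
    digi1Loop D ((pfx, ssum, 0) :: rest) res = digi1Loop D rest (digi1Go D pfx ssum 0 res) := by
  rw [digi1Loop, digi1Go]

-- running the loop on a concatenation processes the frames in order (H = the single-frame case)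
theorem loop_run_list (D : Int) (f : Nat)
    (H : ∀ (fr : Int × Int × Nat) (rest : List (Int × Int × Nat)) (res : List Int), fr.2.2 ≤ f →
      digi1Loop D (fr :: rest) res = digi1Loop D rest (digi1Go D fr.1 fr.2.1 fr.2.2 res)) :
    ∀ (cs : List (Int × Int × Nat)), (∀ c ∈ cs, c.2.2 ≤ f) →
      ∀ (rest : List (Int × Int × Nat)) (res : List Int),
        digi1Loop D (cs ++ rest) res
          = digi1Loop D rest (cs.foldl (fun r fr => digi1Go D fr.1 fr.2.1 fr.2.2 r) res) := by
  intro cs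
  induction cs with
  | nil => intro _ rest res; rfl
  | cons c t ih =>
    intro hcs rest res
    rw [List.cons_append, H c (t ++ rest) res (hcs c (by simp)),
      ih (fun c' hc' => hcs c' (by simp [hc'])) rest, List.foldl_cons]

-- the feasible children of a visited frame, in the order the stack pops them
theorem go_succ_as_children (D pfx ssum : Int) (g : Nat) (res : List Int) :
    digi1Go D pfx ssum (g + 1) res
      = (((PySem.List.pyRange 0 10 1).filter
            (fun d => decide (ssum + d ≤ D ∧ D ≤ ssum + d + 9 * (g : Int)))).map
          (fun d => (pfx * 10 + d, ssum + d, g))).foldl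
          (fun r fr => digi1Go D fr.1 fr.2.1 fr.2.2 r)
          (if ssum = D then PySem.Set.add res pfx else res) := by
  rw [digi1Go]
  exact foldl_if_filter_map
    (P := fun d => ssum + d ≤ D ∧ D ≤ ssum + d + 9 * (g : Int))
    (mk := fun d => (pfx * 10 + d, ssum + d, g))
    (g := fun r fr => digi1Go D fr.1 fr.2.1 fr.2.2 r)
    (PySem.List.pyRange 0 10 1) _

-- the stack loop performs exactly the DFS of digi1Go, frame by frame
theorem loop_run (D : Int) : ∀ (f : Nat) (fr : Int × Int × Nat)
    (rest : List (Int × Int × Nat)) (res : List Int), fr.2.2 ≤ f →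
    digi1Loop D (fr :: rest) res = digi1Loop D rest (digi1Go D fr.1 fr.2.1 fr.2.2 res) := by
  intro f
  induction f with
  | zero =>
    rintro ⟨pfx, ssum, rem⟩ rest res hle
    have h0 : rem = 0 := by simpa using hle
    subst h0
    exact loop_run_zero D pfx ssum rest res
  | succ f ih =>
    rintro ⟨pfx, ssum, rem⟩ rest res hle
    match rem with
    | 0 => exact loop_run_zero D pfx ssum rest res
    | g + 1 =>
      have hg : g ≤ f := by simpa using hle
      rw [digi1Loop]
      rw [foldl_push_rev
        (P := fun d => ssum + d ≤ D ∧ D ≤ ssum + d + 9 * (g : Int))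
        (mk := fun d => (pfx * 10 + d, ssum + d, g)) (PySem.List.pyRange 9 (-1) (-1)) rest]
      have hrev : (PySem.List.pyRange 9 (-1) (-1)).reverse = PySem.List.pyRange 0 10 1 := by
        decide
      rw [hrev]
      rw [loop_run_list D f ih _ ?_ rest]
      · rw [go_succ_as_children]
      · intro c hc
        obtain ⟨d, -, rfl⟩ := List.mem_map.mp hc
        simpa using hg

-- digit sums are zero on nonpositive numbers
theorem dgtSum_nonpos (num : Int) (h : num ≤ 0) : dgtSum num = 0 := by
  unfold dgtSum
  have h0 : num.toNat = 0 := by omega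
  rw [h0]
  rfl

-- from a negative prefix every visited value is negative, so A adds nothing when digit_sum ≠ 0
theorem digi1F_barren (D : Int) : ∀ (f : Nat) (ml cur : Int) (res : List Int), cur < 0 → D ≠ 0 →
    digi1F f D ml cur res = res := by
  intro f
  induction f with
  | zero =>
    intro ml cur res hc hD
    rw [digi1F]
    have hp : ¬ (0 < cur ∧ D < dgtSum cur) := by omega
    have hne : ¬ D = dgtSum cur := by rw [dgtSum_nonpos cur (by omega)]; omega
    rw [if_neg hp]
    simp only [if_neg hne]
    split <;> rfl
  | succ f ih =>
    intro ml cur res hc hD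
    rw [digi1F]
    have hp : ¬ (0 < cur ∧ D < dgtSum cur) := by omega
    have hne : ¬ D = dgtSum cur := by rw [dgtSum_nonpos cur (by omega)]; omega
    rw [if_neg hp]
    simp only [if_neg hne]
    by_cases hml : ml = 0
    · rw [if_pos hml]
    · rw [if_neg hml]
      apply foldl_fix
      intro r' i hi
      rw [PySem.List.mem_pyRange_one] at hi
      exact ih (ml - 1) (cur * 10 + i) r' (by omega) hD

-- with a zero running sum and a negative or unreachable target, B visits only the root
theorem go_barren (D pfx : Int) (rem : Nat) (res : List Int)
    (h : D < 0 ∨ 9 * (rem : Int) < D) : digi1Go D pfx 0 rem res = res := by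
  have hne : ¬ (0 : Int) = D := by
    rcases h with h | h
    · omega
    · have : (0:Int) ≤ 9 * (rem : Int) := by positivity
      omega
  match rem with
  | 0 =>
    rw [digi1Go]
    simp only [if_neg hne]
  | f + 1 =>
    rw [digi1Go]
    simp only [if_neg hne]
    apply foldl_fix
    intro r' d hd
    rw [PySem.List.mem_pyRange_one] at hd
    have hno : ¬ (0 + d ≤ D ∧ D ≤ 0 + d + 9 * (f : Int)) := by
      rcases h with h | h
      · omega
      · push_cast at h; omega
    rw [if_neg hno]

-- ===== VERDICT (by name: the statement is the Claim_ definition above) =====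
theorem digi1_spec : Claim_equal_digi1 := by
  intro digit_sum max_length current result _hdom hpre
  obtain ⟨hm, hrest⟩ := hpre
  unfold Spec_digi1 digi1 digi1_alt
  have hml : max_length = ((max_length.toNat : Nat) : Int) := (Int.toNat_of_nonneg hm).symm
  by_cases hc : 0 ≤ current
  · have h1 : digi1F max_length.toNat digit_sum max_length current result
        = digi1F max_length.toNat digit_sum ((max_length.toNat : Nat) : Int) current result := by
      rw [← hml]
    rw [h1, digi1F_eq_go digit_sum max_length.toNat current result hc,
      loop_run digit_sum max_length.toNat (current, dgtSum current, max_length.toNat) [] result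
        (le_refl _)]
    rw [digi1Loop]
  · have hd : digit_sum < 0 ∨ 9 * max_length < digit_sum := by
      rcases hrest with h | h | h
      · omega
      · exact Or.inl h
      · exact Or.inr h
    have hD0 : digit_sum ≠ 0 := by
      rcases hd with h | h
      · omega
      · omega
    rw [digi1F_barren digit_sum max_length.toNat max_length current result (by omega) hD0,
      loop_run digit_sum max_length.toNat (current, dgtSum current, max_length.toNat) [] result
        (le_refl _), dgtSum_nonpos current (by omega),
      go_barren digit_sum current max_length.toNat result (by rw [← hml]; exact hd)]
    rw [digi1Loop]
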